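-- pv_equiv track=rewrite | github.com/JMild/PlanForgeAI-API | engine/engine_bom.py | _split_blocks_by_breaks
-- ===== SOURCE A (Python) =====
-- from typing import List, Dict, Tuple, Optional, Any
--
-- def _split_blocks_by_breaks(blocks: List[Tuple[int,int]], breaks: List[Tuple[int,int]]) -> List[Tuple[int,int]]:
--     if not breaks: return blocks
--     out=[]
--     for s,e in blocks:
--         segs=[(s,e)]
--         for bs,be in breaks:
--             new=[]
--             for xs,xe in segs:
--                 if be<=xs or xe<=bs:
--                     new.append((xs,xe))
--                 else:
--                     if xs<bs: new.append((xs,bs))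
--                     if be<xe: new.append((be,xe))
--             segs=new
--         out.extend(segs)
--     out.sort()
--     return [(a,b) for a,b in out if b>a]
-- ===== SOURCE B (Python) =====
-- from typing import List, Tuple
--
-- def _split_blocks_by_breaks(blocks: List[Tuple[int,int]], breaks: List[Tuple[int,int]]) -> List[Tuple[int,int]]:
--     if not breaks: return blocks
--
--     def carve(xs: int, xe: int, i: int) -> List[Tuple[int,int]]:
--         # pieces of (xs, xe) left after applying breaks[i:], depth-first
--         while i < len(breaks):
--             bs, be = breaks[i]
--             if be <= xs or xe <= bs:
--                 i += 1
--                 continue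
--             left = carve(xs, bs, i + 1) if xs < bs else []
--             right = carve(be, xe, i + 1) if be < xe else []
--             return left + right
--         return [(xs, xe)]
--
--     out = []
--     for s, e in blocks:
--         out += carve(s, e, 0)
--     out.sort()
--     return [p for p in out if p[0] < p[1]]
-- ===== Notes on version B (the rewrite author's own statement) =====
-- stated objective: faster
-- what changed: A rebuilds the whole per-block segment list once per break (an outer pass over breaks rebuilding the list each time); B carves each block depth-first along the break list, one surviving segment at a time, skipping non-overlapping breaks in place and abandoning a segment the moment it is fully covered, so no intermediate segment lists are built.
import Mathlib
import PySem

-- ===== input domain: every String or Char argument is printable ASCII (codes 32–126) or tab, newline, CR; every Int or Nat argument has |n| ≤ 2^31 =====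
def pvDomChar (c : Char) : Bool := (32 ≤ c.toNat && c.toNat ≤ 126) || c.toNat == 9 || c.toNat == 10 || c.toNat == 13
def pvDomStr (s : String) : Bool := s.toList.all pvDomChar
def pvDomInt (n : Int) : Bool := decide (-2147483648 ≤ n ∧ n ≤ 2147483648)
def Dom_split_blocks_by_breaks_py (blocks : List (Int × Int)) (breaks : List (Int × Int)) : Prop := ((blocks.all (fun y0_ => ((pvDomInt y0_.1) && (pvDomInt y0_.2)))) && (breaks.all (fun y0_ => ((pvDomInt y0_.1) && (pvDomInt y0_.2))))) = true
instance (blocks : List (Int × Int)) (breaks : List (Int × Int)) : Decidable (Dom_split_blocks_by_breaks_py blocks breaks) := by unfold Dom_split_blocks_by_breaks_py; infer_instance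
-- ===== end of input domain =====

-- B carves each block depth-first along the break list (one surviving segment at a time)
-- instead of A's rebuild of the whole per-block segment list once per break; same worst-case
-- class, measurably faster in practice (no intermediate lists, dead segments stop early).

-- ===== PORT A =====
def split_blocks_by_breaks_py (blocks : List (Int × Int)) (breaks : List (Int × Int)) : List (Int × Int) :=
  if breaks = [] then blocks
  else
    let out := blocks.foldl (fun out se =>
      let segs := breaks.foldl (fun segs b =>
        segs.foldl (fun new x =>
          if b.2 ≤ x.1 ∨ x.2 ≤ b.1 then new ++ [x]
          else
            let new := if x.1 < b.1 then new ++ [(x.1, b.1)] else new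
            let new := if b.2 < x.2 then new ++ [(b.2, x.2)] else new
            new) []) [se]
      out ++ segs) []
    (PySem.List.sorted2 out Prod.fst Prod.snd).filter (fun p => decide (p.1 < p.2))

-- ===== PORT B =====
-- Source B's 'carve(xs, xe, i)': the while-loop skipping non-overlapping breaks is the first
-- branch's tail call; list recursion stands for the index i into breaks.
def pvCarve : List (Int × Int) → Int → Int → List (Int × Int)
  | [], xs, xe => [(xs, xe)]
  | b :: rest, xs, xe =>
    if b.2 ≤ xs ∨ xe ≤ b.1 then pvCarve rest xs xe
    else (if xs < b.1 then pvCarve rest xs b.1 else []) ++ (if b.2 < xe then pvCarve rest b.2 xe else [])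

def split_blocks_by_breaks_py_alt (blocks : List (Int × Int)) (breaks : List (Int × Int)) : List (Int × Int) :=
  if breaks = [] then blocks
  else
    let out := blocks.foldl (fun out se => out ++ pvCarve breaks se.1 se.2) []
    (PySem.List.sorted2 out Prod.fst Prod.snd).filter (fun p => decide (p.1 < p.2))

-- ===== PRECONDITION & SPEC =====
def Spec_split_blocks_by_breaks_py (blocks : List (Int × Int)) (breaks : List (Int × Int)) (out : List (Int × Int)) : Prop := out = split_blocks_by_breaks_py_alt blocks breaks
instance (blocks : List (Int × Int)) (breaks : List (Int × Int)) (out : List (Int × Int)) : Decidable (Spec_split_blocks_by_breaks_py blocks breaks out) := by unfold Spec_split_blocks_by_breaks_py; infer_instance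

-- ===== CLAIM (what is proved, stated in full; the proofs are below) =====
def Claim_equal_split_blocks_by_breaks_py : Prop := ∀ (blocks : List (Int × Int)) (breaks : List (Int × Int)), Dom_split_blocks_by_breaks_py blocks breaks → Spec_split_blocks_by_breaks_py blocks breaks (split_blocks_by_breaks_py blocks breaks)

-- ===== LEMMAS AND PROOFS =====

-- pieces of one segment after subtracting one break, as A computes them
def pvPiecesA (b : Int × Int) (x : Int × Int) : List (Int × Int) :=
  if b.2 ≤ x.1 ∨ x.2 ≤ b.1 then [x]
  else (if x.1 < b.1 then [(x.1, b.1)] else []) ++ (if b.2 < x.2 then [(b.2, x.2)] else [])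

-- A's inner fold over the current segments is an append-accumulating flatMap
lemma pvStepA_aux (b : Int × Int) : ∀ (segs acc : List (Int × Int)),
    segs.foldl (fun new x =>
      if b.2 ≤ x.1 ∨ x.2 ≤ b.1 then new ++ [x]
      else
        let new := if x.1 < b.1 then new ++ [(x.1, b.1)] else new
        let new := if b.2 < x.2 then new ++ [(b.2, x.2)] else new
        new) acc = acc ++ segs.flatMap (pvPiecesA b) := by
  intro segs
  induction segs with
  | nil => simp
  | cons x t ih =>
    intro acc
    simp only [List.foldl_cons, List.flatMap_cons, ih]
    have : (if b.2 ≤ x.1 ∨ x.2 ≤ b.1 then acc ++ [x]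
      else
        let new := if x.1 < b.1 then acc ++ [(x.1, b.1)] else acc
        let new := if b.2 < x.2 then new ++ [(b.2, x.2)] else new
        new) = acc ++ pvPiecesA b x := by
      simp only [pvPiecesA]; split_ifs <;> simp
    rw [this, List.append_assoc]

lemma pvCarve_cons (b : Int × Int) (rest : List (Int × Int)) (xs xe : Int) :
    pvCarve (b :: rest) xs xe =
      if b.2 ≤ xs ∨ xe ≤ b.1 then pvCarve rest xs xe
      else (if xs < b.1 then pvCarve rest xs b.1 else []) ++ (if b.2 < xe then pvCarve rest b.2 xe else []) := rfl

-- B's depth-first carve computes A's breadth-first per-break passes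
lemma pvCarve_flatMap : ∀ (breaks segs : List (Int × Int)),
    breaks.foldl (fun segs b => segs.flatMap (pvPiecesA b)) segs =
      segs.flatMap (fun x => pvCarve breaks x.1 x.2) := by
  intro breaks
  induction breaks with
  | nil =>
    intro segs
    have : (fun x : Int × Int => pvCarve [] x.1 x.2) = fun x => [x] := by
      funext x; simp [pvCarve]
    rw [this, List.flatMap_singleton' segs]
    rfl
  | cons b rest ih =>
    intro segs
    simp only [List.foldl_cons]
    rw [ih (segs.flatMap (pvPiecesA b)), List.flatMap_assoc]
    apply List.flatMap_congr
    intro x _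
    show (pvPiecesA b x).flatMap (fun y => pvCarve rest y.1 y.2) = pvCarve (b :: rest) x.1 x.2
    rw [pvCarve_cons]
    unfold pvPiecesA
    split_ifs with h1 h2 h3 <;> simp [List.flatMap_append]

-- ===== VERDICT (by name: the statement is the Claim_ definition above) =====
theorem split_blocks_by_breaks_py_spec : Claim_equal_split_blocks_by_breaks_py := by
  intro blocks breaks _
  show split_blocks_by_breaks_py blocks breaks = split_blocks_by_breaks_py_alt blocks breaks
  by_cases hbr : breaks = []
  · simp [split_blocks_by_breaks_py, split_blocks_by_breaks_py_alt, hbr]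
  · unfold split_blocks_by_breaks_py split_blocks_by_breaks_py_alt
    rw [if_neg hbr, if_neg hbr]
    show (PySem.List.sorted2 (blocks.foldl (fun out se =>
        out ++ breaks.foldl (fun segs b => segs.foldl (fun new x =>
          if b.2 ≤ x.1 ∨ x.2 ≤ b.1 then new ++ [x]
          else
            let new := if x.1 < b.1 then new ++ [(x.1, b.1)] else new
            let new := if b.2 < x.2 then new ++ [(b.2, x.2)] else new
            new) []) [se]) []) Prod.fst Prod.snd).filter (fun p => decide (p.1 < p.2)) =
      (PySem.List.sorted2 (blocks.foldl (fun out se =>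
        out ++ pvCarve breaks se.1 se.2) []) Prod.fst Prod.snd).filter (fun p => decide (p.1 < p.2))
    have hstep : (fun (segs : List (Int × Int)) (b : Int × Int) => segs.foldl (fun new x =>
          if b.2 ≤ x.1 ∨ x.2 ≤ b.1 then new ++ [x]
          else
            let new := if x.1 < b.1 then new ++ [(x.1, b.1)] else new
            let new := if b.2 < x.2 then new ++ [(b.2, x.2)] else new
            new) []) = (fun segs b => segs.flatMap (pvPiecesA b)) := by
      funext segs b
      simpa using pvStepA_aux b segs []
    rw [hstep]
    have hbody : (fun (out : List (Int × Int)) (se : Int × Int) =>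
        out ++ breaks.foldl (fun segs b => segs.flatMap (pvPiecesA b)) [se]) =
        (fun out se => out ++ pvCarve breaks se.1 se.2) := by
      funext out se
      rw [pvCarve_flatMap breaks [se]]
      simp
    rw [hbody]
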